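-- pv_equiv track=rewrite | github.com/lokeshvelayudham/DataStructureAlgorathim-in-Python | 2.dataStructures/skillTest4Attempt2/lostRep.py | find_starting_cell
-- ===== SOURCE A (Python) =====
-- def find_starting_cell(matrix, grade):
--     n = len(matrix)
--
--     # Define the possible neighbor directions (up, down, left, right)
--     directions = [(-1, 0), (1, 0), (0, -1), (0, 1)]
--
--     starting_row = float('inf')
--     starting_col = float('inf')
--
--     for i in range(n):
--         for j in range(n):
--             if matrix[i][j] == grade:
--                 for dx, dy in directions:
--                     new_row, new_col = i + dx, j + dy
--
--                     if 0 <= new_row < n and 0 <= new_col < n and matrix[new_row][new_col] == grade: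
--                         starting_row = min(starting_row, new_row)
--                         starting_col = min(starting_col, new_col)
--
--     if starting_row == float('inf') or starting_col == float('inf'):
--         return -1, -1
--
--     return starting_row, starting_col
-- ===== SOURCE B (Python) =====
-- def find_starting_cell(matrix, grade):
--     n = len(matrix)
--
--     def anchor(i, j):
--         # (i, j) is the top-left endpoint of an adjacent equal-grade pair
--         return matrix[i][j] == grade and (
--             (j + 1 < n and matrix[i][j + 1] == grade)
--             or (i + 1 < n and matrix[i + 1][j] == grade))
--
--     # least row containing an anchor (row-major search, early exit);
--     # every pair endpoint dominates its anchor in both coordinates, so this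
--     # is A's independent minimum row.
--     row = next((i for i in range(n) if any(anchor(i, j) for j in range(n))), -1)
--     if row == -1:
--         return -1, -1
--     # least column containing an anchor (column-major search, early exit)
--     col = next(j for j in range(n) if any(anchor(i, j) for i in range(n)))
--     return row, col
-- ===== Notes on version B (the rewrite author's own statement) =====
-- stated objective: alternative
-- what changed: Replaces A's single full scan with four-direction checks and two running minima by two staged first-match searches with early exit: a row-major search for the first row containing a pair anchor (a cell equal to grade whose right or down neighbor equals grade) gives the minimum row, and a column-major search for the first column containing an anchor gives the minimum column; correct because every endpoint of an adjacent equal pair dominates its top-left anchor in both coordinates.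
import Mathlib
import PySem

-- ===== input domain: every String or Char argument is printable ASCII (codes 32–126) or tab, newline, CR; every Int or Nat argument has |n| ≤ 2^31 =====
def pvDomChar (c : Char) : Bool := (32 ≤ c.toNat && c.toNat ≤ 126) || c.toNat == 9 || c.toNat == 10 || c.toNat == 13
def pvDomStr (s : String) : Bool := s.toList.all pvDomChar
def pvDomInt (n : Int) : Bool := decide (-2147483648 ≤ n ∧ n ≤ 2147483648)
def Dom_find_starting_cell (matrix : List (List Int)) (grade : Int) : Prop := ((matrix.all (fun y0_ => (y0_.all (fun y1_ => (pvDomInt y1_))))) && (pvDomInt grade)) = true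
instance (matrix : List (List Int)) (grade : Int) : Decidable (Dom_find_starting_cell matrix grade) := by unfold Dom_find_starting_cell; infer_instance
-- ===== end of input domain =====

-- B replaces A's full scan with running minima by two staged first-match searches
-- (row-major for the least row with a pair anchor, column-major for the least column),
-- each with early exit (alternative decomposition, same asymptotic cost).

-- matrix[i][j] (none = IndexError); shared by both ports since both Pythons index the same way
def pvCell? (matrix : List (List Int)) (i j : Int) : Option Int :=
  (PySem.List.pyGet? matrix i).bind (fun row => PySem.List.pyGet? row j)

-- ===== PORT A =====
-- running minimum against a possibly-still-infinite accumulator (float('inf') = none)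
def pvMinO (o : Option Int) (v : Int) : Int :=
  match o with
  | none => v
  | some x => min x v

def find_starting_cell (matrix : List (List Int)) (grade : Int) : Int × Int :=
  let n : Int := PySem.List.len matrix
  let directions : List (Int × Int) := [(-1, 0), (1, 0), (0, -1), (0, 1)]
  let st :=
    (PySem.List.pyRange 0 n 1).foldl (fun st i =>
      (PySem.List.pyRange 0 n 1).foldl (fun st j =>
        if pvCell? matrix i j = some grade then
          directions.foldl (fun st d =>
            let nr := i + d.1
            let nc := j + d.2
            if 0 ≤ nr ∧ nr < n ∧ 0 ≤ nc ∧ nc < n ∧ pvCell? matrix nr nc = some grade then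
              (some (pvMinO st.1 nr), some (pvMinO st.2 nc))
            else st) st
        else st) st)
      ((none : Option Int), (none : Option Int))
  match st with
  | (some r, some c) => (r, c)
  | _ => (-1, -1)

-- ===== PORT B =====
-- B's 'anchor(i, j)': cell (i, j) equals grade and its right or down neighbor does too
def pvAnchor (matrix : List (List Int)) (grade : Int) (i j : Int) : Bool :=
  decide (pvCell? matrix i j = some grade ∧
    ((j + 1 < (PySem.List.len matrix : Int) ∧ pvCell? matrix i (j + 1) = some grade) ∨
     (i + 1 < (PySem.List.len matrix : Int) ∧ pvCell? matrix (i + 1) j = some grade)))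

def find_starting_cell_alt (matrix : List (List Int)) (grade : Int) : Int × Int :=
  let n : Int := PySem.List.len matrix
  -- row = next((i for i in range(n) if any(anchor(i, j) for j in range(n))), -1)
  let row : Int :=
    ((PySem.List.pyRange 0 n 1).find? (fun i =>
      (PySem.List.pyRange 0 n 1).any (fun j => pvAnchor matrix grade i j))).getD (-1)
  if row = -1 then (-1, -1)
  else
    -- col = next(j for j in range(n) if any(anchor(i, j) for i in range(n)))
    -- the none branch is Python's StopIteration, unreachable since row found an anchor
    let col : Int :=
      match (PySem.List.pyRange 0 n 1).find? (fun j =>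
        (PySem.List.pyRange 0 n 1).any (fun i => pvAnchor matrix grade i j)) with
      | some j => j
      | none => -1
    (row, col)

-- ===== PRECONDITION & SPEC =====
-- Pre_ excludes ragged inputs (a row shorter than the number of rows), on which Python A raises IndexError.
def Pre_find_starting_cell (matrix : List (List Int)) (grade : Int) : Prop :=
  ∀ row ∈ matrix, matrix.length ≤ row.length
instance (matrix : List (List Int)) (grade : Int) : Decidable (Pre_find_starting_cell matrix grade) := by unfold Pre_find_starting_cell; infer_instance
def pvWitness_find_starting_cell : List (List Int) × Int := ([[1, 2], [1, 3]], 1)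

def Spec_find_starting_cell (matrix : List (List Int)) (grade : Int) (out : Int × Int) : Prop := out = find_starting_cell_alt matrix grade
instance (matrix : List (List Int)) (grade : Int) (out : Int × Int) : Decidable (Spec_find_starting_cell matrix grade out) := by unfold Spec_find_starting_cell; infer_instance

-- ===== CLAIM (what is proved, stated in full; the proofs are below) =====
def Claim_equal_find_starting_cell : Prop := ∀ (matrix : List (List Int)) (grade : Int), Dom_find_starting_cell matrix grade → Pre_find_starting_cell matrix grade → Spec_find_starting_cell matrix grade (find_starting_cell matrix grade)

-- ===== LEMMAS AND PROOFS =====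

-- the multiset of neighbor coordinates A's triple loop feeds its running minima
def pvCoordsA (matrix : List (List Int)) (grade : Int) : List (Int × Int) :=
  let n : Int := PySem.List.len matrix
  (PySem.List.pyRange 0 n 1).flatMap (fun i =>
    ((PySem.List.pyRange 0 n 1).filter (fun j => decide (pvCell? matrix i j = some grade))).flatMap (fun j =>
      (([((-1 : Int), (0 : Int)), (1, 0), (0, -1), (0, 1)]).filter (fun d =>
          decide (0 ≤ i + d.1 ∧ i + d.1 < n ∧ 0 ≤ j + d.2 ∧ j + d.2 < n ∧
            pvCell? matrix (i + d.1) (j + d.2) = some grade))).map (fun d => (i + d.1, j + d.2))))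

-- a cell that is one endpoint of an adjacent equal-grade pair
def pvPaired (matrix : List (List Int)) (grade : Int) (a : Int × Int) : Prop :=
  let n : Int := PySem.List.len matrix
  0 ≤ a.1 ∧ a.1 < n ∧ 0 ≤ a.2 ∧ a.2 < n ∧ pvCell? matrix a.1 a.2 = some grade ∧
    ((a.2 + 1 < n ∧ pvCell? matrix a.1 (a.2 + 1) = some grade) ∨
     (0 ≤ a.2 - 1 ∧ pvCell? matrix a.1 (a.2 - 1) = some grade) ∨
     (a.1 + 1 < n ∧ pvCell? matrix (a.1 + 1) a.2 = some grade) ∨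
     (0 ≤ a.1 - 1 ∧ pvCell? matrix (a.1 - 1) a.2 = some grade))

theorem pvFoldMinO_aux (t : List Int) : ∀ x : Int,
    t.foldl (fun (a : Option Int) v => some (pvMinO a v)) (some x) = some (t.foldl min x) := by
  induction t with
  | nil => intro x; rfl
  | cons y t ih => intro x; exact ih (min x y)

theorem pvFoldMinO (l : List Int) :
    l.foldl (fun (a : Option Int) v => some (pvMinO a v)) none = PySem.List.min? l (fun x => x) := by
  cases l with
  | nil => rfl
  | cons x t =>
    rw [PySem.List.min?_id_cons]
    simpa [List.foldl, pvMinO] using pvFoldMinO_aux t x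

theorem pvFoldA (matrix : List (List Int)) (grade : Int) :
    find_starting_cell matrix grade =
      (match (pvCoordsA matrix grade).foldl
          (fun st (d : Int × Int) => ((some (pvMinO st.1 d.1) : Option Int), (some (pvMinO st.2 d.2) : Option Int)))
          ((none : Option Int), (none : Option Int)) with
        | (some r, some c) => (r, c)
        | _ => (-1, -1)) := by
  unfold find_starting_cell pvCoordsA
  simp only [List.foldl_flatMap, List.foldl_map, PySem.List.foldl_ite_eq_foldl_filter]

theorem pvMemCoordsA (matrix : List (List Int)) (grade : Int) (a : Int × Int) :
    a ∈ pvCoordsA matrix grade ↔ pvPaired matrix grade a := by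
  obtain ⟨r, c⟩ := a
  unfold pvCoordsA pvPaired
  simp only [List.mem_flatMap, List.mem_map, List.mem_filter, PySem.List.mem_pyRange_one,
    List.mem_cons, decide_eq_true_eq]
  constructor
  · rintro ⟨i, ⟨hi0, hin⟩, j, ⟨⟨hj0, hjn⟩, hcell⟩, d, ⟨hd, hb1, hb2, hb3, hb4, hcn⟩, heq⟩
    rw [Prod.mk.injEq] at heq
    obtain ⟨he1, he2⟩ := heq
    rcases hd with rfl | rfl | rfl | rfl | hd
    · -- d = (-1,0): r = i - 1, c = j; neighbor below is (i,j)
      refine ⟨by omega, by omega, by omega, by omega, by rw [← he1, ← he2]; exact hcn, ?_⟩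
      refine Or.inr (Or.inr (Or.inl ⟨by omega, ?_⟩))
      rw [show r + 1 = i from by simp at he1; omega, ← he2]
      simpa using hcell
    · -- d = (1,0)
      refine ⟨by omega, by omega, by omega, by omega, by rw [← he1, ← he2]; exact hcn, ?_⟩
      refine Or.inr (Or.inr (Or.inr ⟨by omega, ?_⟩))
      rw [show r - 1 = i from by simp at he1; omega, ← he2]
      simpa using hcell
    · -- d = (0,-1): neighbor to the right is (i,j)
      refine ⟨by omega, by omega, by omega, by omega, by rw [← he1, ← he2]; exact hcn, ?_⟩
      refine Or.inl ⟨by omega, ?_⟩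
      rw [show c + 1 = j from by simp at he2; omega, ← he1]
      simpa using hcell
    · -- d = (0,1)
      refine ⟨by omega, by omega, by omega, by omega, by rw [← he1, ← he2]; exact hcn, ?_⟩
      refine Or.inr (Or.inl ⟨by omega, ?_⟩)
      rw [show c - 1 = j from by simp at he2; omega, ← he1]
      simpa using hcell
    · simp at hd
  · rintro ⟨hr0, hrn, hc0, hcn, hcell, hadj⟩
    rcases hadj with ⟨h1, h2⟩ | ⟨h1, h2⟩ | ⟨h1, h2⟩ | ⟨h1, h2⟩
    · exact ⟨r, ⟨hr0, hrn⟩, c + 1, ⟨⟨by omega, h1⟩, h2⟩, (0, -1),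
        ⟨by simp, by omega, by omega, by omega, by omega,
          by rw [show r + ((0 : Int), (-1 : Int)).1 = r from by ring,
                 show c + 1 + ((0 : Int), (-1 : Int)).2 = c from by ring]; exact hcell⟩,
        by rw [Prod.mk.injEq]; constructor <;> ring⟩
    · exact ⟨r, ⟨hr0, hrn⟩, c - 1, ⟨⟨h1, by omega⟩, h2⟩, (0, 1),
        ⟨by simp, by omega, by omega, by omega, by omega,
          by rw [show r + ((0 : Int), (1 : Int)).1 = r from by ring,
                 show c - 1 + ((0 : Int), (1 : Int)).2 = c from by ring]; exact hcell⟩,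
        by rw [Prod.mk.injEq]; constructor <;> ring⟩
    · exact ⟨r + 1, ⟨by omega, h1⟩, c, ⟨⟨hc0, hcn⟩, h2⟩, (-1, 0),
        ⟨by simp, by omega, by omega, by omega, by omega,
          by rw [show r + 1 + ((-1 : Int), (0 : Int)).1 = r from by ring,
                 show c + ((-1 : Int), (0 : Int)).2 = c from by ring]; exact hcell⟩,
        by rw [Prod.mk.injEq]; constructor <;> ring⟩
    · exact ⟨r - 1, ⟨h1, by omega⟩, c, ⟨⟨hc0, hcn⟩, h2⟩, (1, 0),
        ⟨by simp, by omega, by omega, by omega, by omega,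
          by rw [show r - 1 + ((1 : Int), (0 : Int)).1 = r from by ring,
                 show c + ((1 : Int), (0 : Int)).2 = c from by ring]; exact hcell⟩,
        by rw [Prod.mk.injEq]; constructor <;> ring⟩

-- an anchor cell is itself a paired cell
theorem pvAnchor_paired (matrix : List (List Int)) (grade : Int) (i j : Int)
    (hi0 : 0 ≤ i) (hin : i < (PySem.List.len matrix : Int))
    (hj0 : 0 ≤ j) (hjn : j < (PySem.List.len matrix : Int))
    (h : pvAnchor matrix grade i j = true) : pvPaired matrix grade (i, j) := by
  unfold pvAnchor at h
  rw [decide_eq_true_iff] at h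
  obtain ⟨hc, hadj⟩ := h
  refine ⟨hi0, hin, hj0, hjn, hc, ?_⟩
  rcases hadj with ⟨h1, h2⟩ | ⟨h1, h2⟩
  · exact Or.inl ⟨h1, h2⟩
  · exact Or.inr (Or.inr (Or.inl ⟨h1, h2⟩))

-- every paired cell dominates some anchor in both coordinates
theorem pvPaired_anchor (matrix : List (List Int)) (grade : Int) (a : Int × Int)
    (h : pvPaired matrix grade a) :
    ∃ i j, 0 ≤ i ∧ i < (PySem.List.len matrix : Int) ∧ 0 ≤ j ∧ j < (PySem.List.len matrix : Int) ∧
      pvAnchor matrix grade i j = true ∧ i ≤ a.1 ∧ j ≤ a.2 := by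
  obtain ⟨r, c⟩ := a
  obtain ⟨hr0, hrn, hc0, hcn, hcell, hadj⟩ := h
  rcases hadj with ⟨h1, h2⟩ | ⟨h1, h2⟩ | ⟨h1, h2⟩ | ⟨h1, h2⟩
  · exact ⟨r, c, hr0, hrn, hc0, hcn,
      by unfold pvAnchor; rw [decide_eq_true_iff]; exact ⟨hcell, Or.inl ⟨h1, h2⟩⟩,
      le_refl r, le_refl c⟩
  · refine ⟨r, c - 1, hr0, hrn, h1, by omega, ?_, le_refl r, by omega⟩
    unfold pvAnchor; rw [decide_eq_true_iff]
    refine ⟨h2, Or.inl ⟨by omega, ?_⟩⟩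
    rw [show c - 1 + 1 = c from by ring]; exact hcell
  · exact ⟨r, c, hr0, hrn, hc0, hcn,
      by unfold pvAnchor; rw [decide_eq_true_iff]; exact ⟨hcell, Or.inr ⟨h1, h2⟩⟩,
      le_refl r, le_refl c⟩
  · refine ⟨r - 1, c, h1, by omega, hc0, hcn, ?_, by omega, le_refl c⟩
    unfold pvAnchor; rw [decide_eq_true_iff]
    refine ⟨h2, Or.inr ⟨by omega, ?_⟩⟩
    rw [show r - 1 + 1 = r from by ring]; exact hcell

-- find? on a strictly increasing list returns the least satisfier
theorem pv_find?_min {p : Int → Bool} (l : List Int) (hl : l.Pairwise (· < ·)) (x : Int)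
    (hf : l.find? p = some x) : ∀ y ∈ l, p y = true → x ≤ y := by
  induction l with
  | nil => simp at hf
  | cons a t ih =>
    rw [List.find?_cons] at hf
    rw [List.pairwise_cons] at hl
    intro y hy hpy
    rw [List.mem_cons] at hy
    by_cases hpa : p a = true
    · rw [hpa] at hf
      obtain rfl : a = x := by injection hf
      rcases hy with rfl | hy
      · exact le_refl y
      · exact le_of_lt (hl.1 y hy)
    · rw [Bool.not_eq_true] at hpa
      rw [hpa] at hf
      rcases hy with rfl | hy
      · rw [hpy] at hpa; exact absurd hpa (by simp)
      · exact ih hl.2 hf y hy hpy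

-- B's row predicate holds at i iff some anchor lives in row i (i scanned in range)
theorem pv_rowPred (matrix : List (List Int)) (grade : Int) (i : Int) :
    ((PySem.List.pyRange 0 (PySem.List.len matrix) 1).any (fun j => pvAnchor matrix grade i j)) = true ↔
      ∃ j, 0 ≤ j ∧ j < (PySem.List.len matrix : Int) ∧ pvAnchor matrix grade i j = true := by
  rw [List.any_eq_true]
  constructor
  · rintro ⟨j, hj, hp⟩
    rw [PySem.List.mem_pyRange_one] at hj
    exact ⟨j, hj.1, by simpa using hj.2, hp⟩
  · rintro ⟨j, hj0, hjn, hp⟩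
    exact ⟨j, by rw [PySem.List.mem_pyRange_one]; exact ⟨hj0, by simpa using hjn⟩, hp⟩

theorem pv_colPred (matrix : List (List Int)) (grade : Int) (j : Int) :
    ((PySem.List.pyRange 0 (PySem.List.len matrix) 1).any (fun i => pvAnchor matrix grade i j)) = true ↔
      ∃ i, 0 ≤ i ∧ i < (PySem.List.len matrix : Int) ∧ pvAnchor matrix grade i j = true := by
  rw [List.any_eq_true]
  constructor
  · rintro ⟨i, hi, hp⟩
    rw [PySem.List.mem_pyRange_one] at hi
    exact ⟨i, hi.1, by simpa using hi.2, hp⟩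
  · rintro ⟨i, hi0, hin, hp⟩
    exact ⟨i, by rw [PySem.List.mem_pyRange_one]; exact ⟨hi0, by simpa using hin⟩, hp⟩

theorem find_starting_cell_spec_aux (matrix : List (List Int)) (grade : Int) :
    find_starting_cell matrix grade = find_starting_cell_alt matrix grade := by
  rw [pvFoldA]
  rw [PySem.List.foldl_prod_mk (f := fun a (e : Int × Int) => some (pvMinO a e.1))
    (g := fun b (e : Int × Int) => some (pvMinO b e.2))]
  have hA1 : (pvCoordsA matrix grade).foldl (fun a e => some (pvMinO a e.1)) none =
      PySem.List.min? ((pvCoordsA matrix grade).map Prod.fst) (fun x => x) := by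
    rw [← pvFoldMinO, List.foldl_map]
  have hA2 : (pvCoordsA matrix grade).foldl (fun b e => some (pvMinO b e.2)) none =
      PySem.List.min? ((pvCoordsA matrix grade).map Prod.snd) (fun x => x) := by
    rw [← pvFoldMinO, List.foldl_map]
  unfold find_starting_cell_alt
  by_cases hP : pvCoordsA matrix grade = []
  · -- no paired cell: A yields (-1,-1); B's row search fails
    have hrow : (PySem.List.pyRange 0 (PySem.List.len matrix) 1).find? (fun i =>
        (PySem.List.pyRange 0 (PySem.List.len matrix) 1).any (fun j => pvAnchor matrix grade i j)) = none := by
      rw [List.find?_eq_none]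
      intro i hi
      rw [PySem.List.mem_pyRange_one] at hi
      simp only [Bool.not_eq_true]
      rw [Bool.eq_false_iff, Ne, pv_rowPred]
      rintro ⟨j, hj0, hjn, hanch⟩
      have hp := pvAnchor_paired matrix grade i j hi.1 (by simpa using hi.2) hj0 hjn hanch
      rw [← pvMemCoordsA] at hp
      rw [hP] at hp
      simp at hp
    rw [hA1, hA2, hP]
    simp only [List.map_nil, hrow, Option.getD_none]
    rfl
  · -- some paired cell exists
    obtain ⟨mr, hmr⟩ : ∃ m, PySem.List.min? ((pvCoordsA matrix grade).map Prod.fst) (fun x => x) = some m := by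
      cases h : PySem.List.min? ((pvCoordsA matrix grade).map Prod.fst) (fun x => x) with
      | none => rw [PySem.List.min?_eq_none_iff, List.map_eq_nil_iff] at h; exact absurd h hP
      | some m => exact ⟨m, rfl⟩
    obtain ⟨mc, hmc⟩ : ∃ m, PySem.List.min? ((pvCoordsA matrix grade).map Prod.snd) (fun x => x) = some m := by
      cases h : PySem.List.min? ((pvCoordsA matrix grade).map Prod.snd) (fun x => x) with
      | none => rw [PySem.List.min?_eq_none_iff, List.map_eq_nil_iff] at h; exact absurd h hP
      | some m => exact ⟨m, rfl⟩
    -- the paired cell attaining the row minimum, and its dominating anchor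
    obtain ⟨p1, hp1mem, hp1⟩ : ∃ p ∈ pvCoordsA matrix grade, p.1 = mr := by
      have := PySem.List.min?_mem hmr
      rw [List.mem_map] at this
      obtain ⟨p, hp, he⟩ := this
      exact ⟨p, hp, he⟩
    obtain ⟨p2, hp2mem, hp2⟩ : ∃ p ∈ pvCoordsA matrix grade, p.2 = mc := by
      have := PySem.List.min?_mem hmc
      rw [List.mem_map] at this
      obtain ⟨p, hp, he⟩ := this
      exact ⟨p, hp, he⟩
    obtain ⟨i1, j1, hi10, hi1n, hj10, hj1n, hanch1, hle1, _⟩ :=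
      pvPaired_anchor matrix grade p1 ((pvMemCoordsA matrix grade p1).1 hp1mem)
    obtain ⟨i2, j2, hi20, hi2n, hj20, hj2n, hanch2, _, hle2⟩ :=
      pvPaired_anchor matrix grade p2 ((pvMemCoordsA matrix grade p2).1 hp2mem)
    -- the row search succeeds and returns exactly mr
    have hrowfind : ∃ r, (PySem.List.pyRange 0 (PySem.List.len matrix) 1).find? (fun i =>
        (PySem.List.pyRange 0 (PySem.List.len matrix) 1).any (fun j => pvAnchor matrix grade i j)) = some r := by
      cases h : (PySem.List.pyRange 0 (PySem.List.len matrix) 1).find? (fun i =>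
          (PySem.List.pyRange 0 (PySem.List.len matrix) 1).any (fun j => pvAnchor matrix grade i j)) with
      | none =>
        rw [List.find?_eq_none] at h
        exfalso
        refine h i1 (by rw [PySem.List.mem_pyRange_one]; exact ⟨hi10, by simpa using hi1n⟩) ?_
        rw [pv_rowPred]
        exact ⟨j1, hj10, hj1n, hanch1⟩
      | some r => exact ⟨r, rfl⟩
    obtain ⟨r, hr⟩ := hrowfind
    -- r is a row with an anchor, hence a paired cell, hence mr ≤ r
    have hrpred := List.find?_some hr
    rw [pv_rowPred] at hrpred
    obtain ⟨jr, hjr0, hjrn, hanchr⟩ := hrpred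
    have hrmem := List.mem_of_find?_eq_some hr
    rw [PySem.List.mem_pyRange_one] at hrmem
    have hrpaired := pvAnchor_paired matrix grade r jr hrmem.1 (by simpa using hrmem.2) hjr0 hjrn hanchr
    rw [← pvMemCoordsA] at hrpaired
    have hmr_le_r : mr ≤ r := by
      have := PySem.List.min?_isMin hmr (r, jr).1 (List.mem_map_of_mem hrpaired)
      simpa using this
    have hr_le_mr : r ≤ mr := by
      have := pv_find?_min _ (PySem.List.pairwise_lt_pyRange_one _ _) r hr i1
        (by rw [PySem.List.mem_pyRange_one]; exact ⟨hi10, by simpa using hi1n⟩)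
        (by rw [pv_rowPred]; exact ⟨j1, hj10, hj1n, hanch1⟩)
      omega
    have hreq : r = mr := le_antisymm hr_le_mr hmr_le_r
    -- mr ≥ 0, so row ≠ -1
    have hmr0 : 0 ≤ mr := by
      have := (pvMemCoordsA matrix grade p1).1 hp1mem
      obtain ⟨h0, _⟩ := this
      omega
    -- the column search returns exactly mc
    have hcolfind : ∃ c, (PySem.List.pyRange 0 (PySem.List.len matrix) 1).find? (fun j =>
        (PySem.List.pyRange 0 (PySem.List.len matrix) 1).any (fun i => pvAnchor matrix grade i j)) = some c := by
      cases h : (PySem.List.pyRange 0 (PySem.List.len matrix) 1).find? (fun j =>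
          (PySem.List.pyRange 0 (PySem.List.len matrix) 1).any (fun i => pvAnchor matrix grade i j)) with
      | none =>
        rw [List.find?_eq_none] at h
        exfalso
        refine h j2 (by rw [PySem.List.mem_pyRange_one]; exact ⟨hj20, by simpa using hj2n⟩) ?_
        rw [pv_colPred]
        exact ⟨i2, hi20, hi2n, hanch2⟩
      | some c => exact ⟨c, rfl⟩
    obtain ⟨c, hc⟩ := hcolfind
    have hcpred := List.find?_some hc
    rw [pv_colPred] at hcpred
    obtain ⟨ic, hic0, hicn, hanchc⟩ := hcpred
    have hcmem := List.mem_of_find?_eq_some hc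
    rw [PySem.List.mem_pyRange_one] at hcmem
    have hcpaired := pvAnchor_paired matrix grade ic c hic0 hicn hcmem.1 (by simpa using hcmem.2) hanchc
    rw [← pvMemCoordsA] at hcpaired
    have hmc_le_c : mc ≤ c := by
      have := PySem.List.min?_isMin hmc (ic, c).2 (List.mem_map_of_mem hcpaired)
      simpa using this
    have hc_le_mc : c ≤ mc := by
      have := pv_find?_min _ (PySem.List.pairwise_lt_pyRange_one _ _) c hc j2
        (by rw [PySem.List.mem_pyRange_one]; exact ⟨hj20, by simpa using hj2n⟩)
        (by rw [pv_colPred]; exact ⟨i2, hi20, hi2n, hanch2⟩)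
      omega
    have hceq : c = mc := le_antisymm hc_le_mc hmc_le_c
    rw [hA1, hA2, hmr, hmc]
    simp only [hr, hc, hreq, hceq, Option.getD_some]
    rw [if_neg (by omega)]

-- ===== VERDICT (by name: the statement is the Claim_ definition above) =====
theorem find_starting_cell_spec : Claim_equal_find_starting_cell := by
  intro matrix grade _ _
  unfold Spec_find_starting_cell
  exact find_starting_cell_spec_aux matrix grade
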